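-- pv_equiv track=rewrite | github.com/amirahnadzri/fypsoftware | TestServer/backendproject/web_scraping.py | final_category
-- ===== SOURCE A (Python) =====
-- def final_category(category_list):
--       to_find = [ "beef", "pork", "chicken","egg","nut", "dairy","milk","fish","grain", "seafood","vegetable","fruit","nut", "dairy","milk", "alcohol", "herb","plant", "animal", "water", "chemical"]
--       count = 0
--
--       category_list = [each_string.lower() for each_string in category_list]
--       for find in to_find:
--         str_match = list(filter(lambda x: find in x, category_list))
--         if str_match:
--           break
--         count = count + 1
--       if count == 21:
--         return "not in category"
--       if to_find[count] == "fruit" or to_find[count] == "vegetable" or to_find[count] == "herb" :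
--         return to_find[12]
--       return to_find[count]
-- ===== SOURCE B (Python) =====
-- def final_category(category_list):
--     keywords = ["beef", "pork", "chicken", "egg", "nut", "dairy", "milk", "fish",
--                 "grain", "seafood", "vegetable", "fruit", "nut", "dairy", "milk",
--                 "alcohol", "herb", "plant", "animal", "water", "chemical"]
--     best = None
--     for s in category_list:
--         low = s.lower()
--         for i, kw in enumerate(keywords):
--             if kw in low and (best is None or i < best):
--                 best = i
--     if best is None:
--         return "not in category"
--     kw = keywords[best]
--     return "nut" if kw in ("fruit", "vegetable", "herb") else kw
-- ===== Notes on version B (the rewrite author's own statement) =====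
-- stated objective: alternative
-- what changed: B iterates over the data strings instead of the keyword list, maintaining a running minimum keyword-priority index (no early break, no per-keyword filter pass), then remaps the winning keyword at the end.
import Mathlib
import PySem

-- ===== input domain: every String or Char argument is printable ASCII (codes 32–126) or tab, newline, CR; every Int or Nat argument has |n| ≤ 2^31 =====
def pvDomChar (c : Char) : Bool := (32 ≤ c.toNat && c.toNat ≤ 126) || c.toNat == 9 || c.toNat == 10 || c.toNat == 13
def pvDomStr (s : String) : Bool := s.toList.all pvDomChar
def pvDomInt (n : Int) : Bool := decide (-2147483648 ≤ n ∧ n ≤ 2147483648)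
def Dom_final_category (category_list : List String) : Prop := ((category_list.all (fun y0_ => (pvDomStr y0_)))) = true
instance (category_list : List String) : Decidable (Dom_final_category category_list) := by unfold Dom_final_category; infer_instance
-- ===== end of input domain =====

-- B iterates over the data strings instead of the keyword list, keeping a running minimum
-- keyword-priority index; alternative decomposition, same behaviour.

-- ===== PORT A =====
def pvKeywords : List String :=
  ["beef", "pork", "chicken", "egg", "nut", "dairy", "milk", "fish", "grain", "seafood",
   "vegetable", "fruit", "nut", "dairy", "milk", "alcohol", "herb", "plant", "animal",
   "water", "chemical"]

-- the `for find in to_find` loop with its `count` accumulator and `break`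
def aLoop (lowered : List String) : List String → Nat → Nat
  | [], count => count
  | find :: rest, count =>
    let str_match := lowered.filter (fun x => PySem.Str.isIn find x)
    if str_match ≠ [] then count else aLoop lowered rest (count + 1)

def final_category (category_list : List String) : String :=
  let to_find := pvKeywords
  let lowered := category_list.map PySem.Str.lower
  let count := aLoop lowered to_find 0
  if count = 21 then "not in category"
  else if to_find.getD count "" = "fruit" ∨ to_find.getD count "" = "vegetable"
          ∨ to_find.getD count "" = "herb" then to_find.getD 12 ""
  else to_find.getD count ""

-- ===== PORT B =====
-- `if kw in low and (best is None or i < best): best = i`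
def bStep (low : String) (best : Option Int) (p : Int × String) : Option Int :=
  if PySem.Str.isIn p.2 low && (match best with | none => true | some j => decide (p.1 < j))
  then some p.1 else best

def final_category_alt (category_list : List String) : String :=
  let best := category_list.foldl
    (fun best s => (PySem.List.enumerate pvKeywords 0).foldl (bStep (PySem.Str.lower s)) best)
    none
  match best with
  | none => "not in category"
  | some i =>
    let kw := pvKeywords.getD i.toNat ""
    if kw = "fruit" ∨ kw = "vegetable" ∨ kw = "herb" then "nut" else kw

-- ===== PRECONDITION & SPEC =====
def Spec_final_category (category_list : List String) (out : String) : Prop := out = final_category_alt category_list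
instance (category_list : List String) (out : String) : Decidable (Spec_final_category category_list out) := by unfold Spec_final_category; infer_instance

-- ===== CLAIM (what is proved, stated in full; the proofs are below) =====
def Claim_equal_final_category : Prop := ∀ (category_list : List String), Dom_final_category category_list → Spec_final_category category_list (final_category category_list)

-- ===== LEMMAS AND PROOFS =====

-- A's loop returns its start count plus the index of the first matching keyword
theorem aLoop_eq_findIdx (lowered : List String) :
    ∀ (ks : List String) (c : Nat),
      aLoop lowered ks c = c + ks.findIdx (fun kw => lowered.any (fun x => PySem.Str.isIn kw x)) := by
  intro ks
  induction ks with
  | nil => intro c; simp [aLoop]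
  | cons k rest ih =>
    intro c
    have hiff : (lowered.filter (fun x => PySem.Str.isIn k x) ≠ []) ↔
        (lowered.any (fun x => PySem.Str.isIn k x) = true) := by
      constructor
      · intro h
        rcases List.exists_mem_of_ne_nil _ h with ⟨x, hx⟩
        exact List.any_eq_true.mpr ⟨x, List.mem_of_mem_filter hx, List.of_mem_filter hx⟩
      · intro h hnil
        rcases List.any_eq_true.mp h with ⟨x, hx, hp⟩
        have hm := List.mem_filter.mpr ⟨hx, hp⟩
        rw [hnil] at hm
        exact absurd hm (List.not_mem_nil)
    rw [show aLoop lowered (k :: rest) c =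
        (if lowered.filter (fun x => PySem.Str.isIn k x) ≠ [] then c
         else aLoop lowered rest (c + 1)) from rfl]
    by_cases hany : lowered.any (fun x => PySem.Str.isIn k x) = true
    · rw [if_pos (hiff.mpr hany), List.findIdx_cons]
      simp only [hany, cond_true]
      omega
    · rw [if_neg (fun hh => hany (hiff.mp hh)), List.findIdx_cons, ih]
      simp only [Bool.not_eq_true] at hany
      simp only [hany, cond_false]
      omega

-- findIdx of a disjunction is the min of the findIdx's
theorem findIdx_or_eq_min {α : Type} (p q : α → Bool) :
    ∀ ks : List α, ks.findIdx (fun k => p k || q k) = min (ks.findIdx p) (ks.findIdx q) := by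
  intro ks
  induction ks with
  | nil => simp only [List.findIdx_nil]; omega
  | cons k rest ih =>
    rw [List.findIdx_cons, List.findIdx_cons, List.findIdx_cons, ih]
    by_cases hp : p k <;> by_cases hq : q k <;>
      simp only [hp, hq, Bool.or_false, Bool.or_true, cond_true, cond_false] <;> omega

-- B's inner keyword scan folds the string's first-match index into `best` as a min
theorem bInner_eq (low : String) :
    ∀ (ks : List String) (o : Int) (b : Option Int),
      (PySem.List.enumerate ks o).foldl (bStep low) b =
        (if _h : ks.findIdx (fun kw => PySem.Str.isIn kw low) = ks.length then b
         else match b with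
              | none => some (o + ks.findIdx (fun kw => PySem.Str.isIn kw low))
              | some j => some (min j (o + ks.findIdx (fun kw => PySem.Str.isIn kw low)))) := by
  intro ks
  induction ks with
  | nil =>
    intro o b
    simp only [PySem.List.enumerate_nil, List.foldl_nil, List.findIdx_nil, List.length_nil]
    rw [dif_pos trivial]
  | cons k rest ih =>
    intro o b
    rw [PySem.List.enumerate_cons, List.foldl_cons, ih, List.findIdx_cons]
    have hle : rest.findIdx (fun kw => PySem.Str.isIn kw low) ≤ rest.length :=
      List.findIdx_le_length
    by_cases hk : PySem.Str.isIn k low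
    · simp only [hk, cond_true, List.length_cons]
      rw [dif_neg (by omega : ¬ (0 : Nat) = rest.length + 1)]
      cases b with
      | none =>
        have hb : bStep low none (o, k) = some o := by
          simp only [bStep]
          rw [hk]
          simp
        rw [hb]
        by_cases hrest : rest.findIdx (fun kw => PySem.Str.isIn kw low) = rest.length
        · rw [dif_pos hrest]; simp
        · rw [dif_neg hrest]
          simp only [Option.some.injEq]
          push_cast
          omega
      | some j =>
        have hb : bStep low (some j) (o, k) = if o < j then some o else some j := by
          simp only [bStep]
          rw [hk]
          by_cases hj : o < j <;> simp [hj]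
        rw [hb]
        by_cases hj : o < j <;> simp only [hj, if_true, if_false] <;>
          (by_cases hrest : rest.findIdx (fun kw => PySem.Str.isIn kw low) = rest.length)
        · rw [dif_pos hrest]; simp only [Option.some.injEq]; omega
        · rw [dif_neg hrest]; simp only [Option.some.injEq]; push_cast; omega
        · rw [dif_pos hrest]; simp only [Option.some.injEq]; omega
        · rw [dif_neg hrest]; simp only [Option.some.injEq]; push_cast; omega
    · simp only [hk, cond_false, List.length_cons]
      have hb : bStep low b (o, k) = b := by
        have hkc : PySem.Str.isIn k low = false := by simpa using hk
        cases b with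
        | none => simp only [bStep]; rw [hkc]; simp
        | some j => simp only [bStep]; rw [hkc]; simp
      rw [hb]
      by_cases hrest : rest.findIdx (fun kw => PySem.Str.isIn kw low) = rest.length
      · rw [dif_pos hrest, dif_pos (by omega)]
      · rw [dif_neg hrest, dif_neg (by omega)]
        cases b with
        | none => simp only [Option.some.injEq]; push_cast; omega
        | some j => simp only [Option.some.injEq]; push_cast; omega

-- B's whole double loop computes the global first-match index (as an Option)
theorem bOuter_eq (L : List String) :
    ∀ b : Option Int,
      L.foldl (fun best s => (PySem.List.enumerate pvKeywords 0).foldl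
                 (bStep (PySem.Str.lower s)) best) b =
      (if _h : pvKeywords.findIdx
            (fun kw => L.any (fun s => PySem.Str.isIn kw (PySem.Str.lower s))) = 21 then b
       else match b with
            | none => some (pvKeywords.findIdx
                (fun kw => L.any (fun s => PySem.Str.isIn kw (PySem.Str.lower s))))
            | some j => some (min j (pvKeywords.findIdx
                (fun kw => L.any (fun s => PySem.Str.isIn kw (PySem.Str.lower s)))))) := by
  induction L with
  | nil => intro b; rw [List.foldl_nil, dif_pos (by decide)]
  | cons s rest ih =>
    intro b
    rw [List.foldl_cons, bInner_eq, ih]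
    have hlen : pvKeywords.length = 21 := rfl
    rw [hlen]
    set A := pvKeywords.findIdx (fun kw => PySem.Str.isIn kw (PySem.Str.lower s)) with hA
    set R := pvKeywords.findIdx
      (fun kw => rest.any (fun t => PySem.Str.isIn kw (PySem.Str.lower t))) with hR
    set T := pvKeywords.findIdx
      (fun kw => (s :: rest).any (fun t => PySem.Str.isIn kw (PySem.Str.lower t))) with hT
    have hor : T = min A R := by
      rw [hT, hA, hR]
      rw [← findIdx_or_eq_min]
      all_goals congr 1
    have haA : A ≤ 21 := by rw [hA, ← hlen]; exact List.findIdx_le_length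
    have haR : R ≤ 21 := by rw [hR, ← hlen]; exact List.findIdx_le_length
    cases b with
    | none =>
      by_cases hs : A = 21
      · rw [dif_pos hs]
        by_cases hr : R = 21
        · rw [dif_pos hr, dif_pos (by omega : T = 21)]
        · rw [dif_neg hr, dif_neg (by omega : ¬ T = 21)]
          dsimp only
          simp only [Option.some.injEq]
          omega
      · rw [dif_neg hs]
        by_cases hr : R = 21
        · rw [dif_pos hr, dif_neg (by omega : ¬ T = 21)]
          dsimp only
          simp only [Option.some.injEq]
          omega
        · rw [dif_neg hr, dif_neg (by omega : ¬ T = 21)]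
          dsimp only
          simp only [Option.some.injEq]
          omega
    | some j =>
      by_cases hs : A = 21
      · rw [dif_pos hs]
        by_cases hr : R = 21
        · rw [dif_pos hr, dif_pos (by omega : T = 21)]
        · rw [dif_neg hr, dif_neg (by omega : ¬ T = 21)]
          dsimp only
          simp only [Option.some.injEq]
          omega
      · rw [dif_neg hs]
        by_cases hr : R = 21
        · rw [dif_pos hr, dif_neg (by omega : ¬ T = 21)]
          dsimp only
          simp only [Option.some.injEq]
          omega
        · rw [dif_neg hr, dif_neg (by omega : ¬ T = 21)]
          dsimp only
          simp only [Option.some.injEq]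
          omega

-- the final remapping agrees on every reachable index
theorem remap_eq : ∀ n : Nat, n < 21 →
    (if pvKeywords.getD n "" = "fruit" ∨ pvKeywords.getD n "" = "vegetable"
        ∨ pvKeywords.getD n "" = "herb" then pvKeywords.getD 12 ""
     else pvKeywords.getD n "") =
    (if pvKeywords.getD n "" = "fruit" ∨ pvKeywords.getD n "" = "vegetable"
        ∨ pvKeywords.getD n "" = "herb" then "nut" else pvKeywords.getD n "") := by
  decide

-- ===== VERDICT (by name: the statement is the Claim_ definition above) =====
theorem final_category_spec : Claim_equal_final_category := by
  intro L _
  unfold Spec_final_category final_category final_category_alt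
  dsimp only
  rw [bOuter_eq, aLoop_eq_findIdx]
  have heq : ∀ kw, (L.map PySem.Str.lower).any (fun x => PySem.Str.isIn kw x) =
      L.any (fun s => PySem.Str.isIn kw (PySem.Str.lower s)) := by
    intro kw; rw [List.any_map]; rfl
  have hfun : (fun kw => (L.map PySem.Str.lower).any (fun x => PySem.Str.isIn kw x)) =
      (fun kw => L.any (fun s => PySem.Str.isIn kw (PySem.Str.lower s))) :=
    funext heq
  set n := pvKeywords.findIdx (fun kw => L.any (fun s => PySem.Str.isIn kw (PySem.Str.lower s))) with hn
  have hA : pvKeywords.findIdx (fun kw => (L.map PySem.Str.lower).any (fun x => PySem.Str.isIn kw x)) = n := by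
    rw [hfun]
  have hle : n ≤ 21 := by rw [hn]; exact List.findIdx_le_length
  simp only [Nat.zero_add, hA]
  by_cases h21 : n = 21
  · simp [h21]
  · have hlt : n < 21 := by omega
    simp only [h21, dite_false, ite_false]
    have := remap_eq n hlt
    simpa [Int.toNat_natCast] using this
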